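-- pv_equiv track=rewrite | github.com/gaochao-git/eagle_agent | agent/hardwareInfo.py | domain_is_valid
-- ===== SOURCE A (Python) =====
-- def domain_is_valid(domain):
--     if '.' in domain:
--         d=domain.split('.')
--         for i in d:
--             for c in i:
--                 if not (ord(c) == 45 or 57 >= ord(c) >= 48 or 97 <= ord(c) <= 122 or ord(c) == 46):
--                     return 0
--     else:
--         return 0
--
--     return 1
-- ===== SOURCE B (Python) =====
-- ALLOWED = set("-.0123456789abcdefghijklmnopqrstuvwxyz")
--
--
-- def domain_is_valid(domain):
--     if '.' not in domain:
--         return 0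
--     return 1 if not (set(domain) - ALLOWED) else 0
-- ===== Notes on version B (the rewrite author's own statement) =====
-- stated objective: simpler
-- what changed: Replaces the split plus nested character loop with a whole-set operation: build the set of distinct characters and subtract the constant set of allowed characters; valid iff the difference is empty.
import Mathlib
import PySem

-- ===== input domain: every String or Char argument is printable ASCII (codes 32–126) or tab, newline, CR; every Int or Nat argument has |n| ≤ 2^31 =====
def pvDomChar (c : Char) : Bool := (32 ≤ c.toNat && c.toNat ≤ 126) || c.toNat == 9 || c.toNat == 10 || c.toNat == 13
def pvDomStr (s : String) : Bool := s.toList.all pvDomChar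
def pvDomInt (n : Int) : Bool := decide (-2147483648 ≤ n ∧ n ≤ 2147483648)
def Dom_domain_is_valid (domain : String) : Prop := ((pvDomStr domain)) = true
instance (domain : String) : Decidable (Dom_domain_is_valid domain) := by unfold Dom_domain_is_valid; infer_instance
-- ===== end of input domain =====

-- B replaces A's split + nested character loop by a whole-set operation (distinct chars minus the allowed set); objective: simpler.

-- ===== PORT A =====
-- inner 'for c in i' loop with its early 'return 0'
def pvLoopChars (cs : List Char) : Option Int :=
  match cs with
  | [] => none
  | c :: rest =>
      if ¬(c.toNat = 45 ∨ (57 ≥ c.toNat ∧ c.toNat ≥ 48) ∨ (97 ≤ c.toNat ∧ c.toNat ≤ 122) ∨ c.toNat = 46)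
      then some 0 else pvLoopChars rest

-- outer 'for i in d' loop, propagating the early return
def pvLoopParts (ps : List (List Char)) : Option Int :=
  match ps with
  | [] => none
  | i :: rest =>
      match pvLoopChars i with
      | some r => some r
      | none => pvLoopParts rest

def domain_is_valid (domain : String) : Int :=
  if PySem.Str.isIn "." domain then
    let d := PySem.Chars.splitOn domain.toList ['.']
    match pvLoopParts d with
    | some r => r
    | none => 1
  else 0

-- ===== PORT B =====
-- module constant ALLOWED = set("-.0123456789abcdefghijklmnopqrstuvwxyz")
def pvALLOWED : PySem.Set Char := PySem.Set.ofList "-.0123456789abcdefghijklmnopqrstuvwxyz".toList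

def domain_is_valid_alt (domain : String) : Int :=
  if ¬ PySem.Str.isIn "." domain then 0
  else if PySem.Set.diff (PySem.Set.ofList domain.toList) pvALLOWED = [] then 1 else 0

-- ===== PRECONDITION & SPEC =====
def Spec_domain_is_valid (domain : String) (out : Int) : Prop := out = domain_is_valid_alt domain
instance (domain : String) (out : Int) : Decidable (Spec_domain_is_valid domain out) := by unfold Spec_domain_is_valid; infer_instance

-- ===== CLAIM (what is proved, stated in full; the proofs are below) =====
def Claim_equal_domain_is_valid : Prop := ∀ (domain : String), Dom_domain_is_valid domain → Spec_domain_is_valid domain (domain_is_valid domain)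

-- ===== LEMMAS AND PROOFS =====

-- the character test of A, as a boolean predicate
def pvOkA (c : Char) : Bool :=
  decide (c.toNat = 45 ∨ (57 ≥ c.toNat ∧ c.toNat ≥ 48) ∨ (97 ≤ c.toNat ∧ c.toNat ≤ 122) ∨ c.toNat = 46)

theorem pvLoopChars_eq (cs : List Char) :
    pvLoopChars cs = if ∀ c ∈ cs, pvOkA c = true then none else some 0 := by
  induction cs with
  | nil => simp [pvLoopChars]
  | cons c rest ih =>
      by_cases h : c.toNat = 45 ∨ (57 ≥ c.toNat ∧ c.toNat ≥ 48) ∨ (97 ≤ c.toNat ∧ c.toNat ≤ 122) ∨ c.toNat = 46 <;>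
        simp [pvLoopChars, ih, pvOkA, h]

theorem pvLoopParts_eq (ps : List (List Char)) :
    pvLoopParts ps = if ∀ p ∈ ps, ∀ c ∈ p, pvOkA c = true then none else some 0 := by
  induction ps with
  | nil => simp [pvLoopParts]
  | cons p rest ih =>
      simp only [pvLoopParts, pvLoopChars_eq, ih, List.forall_mem_cons]
      by_cases h : ∀ c ∈ p, pvOkA c = true
      · rw [if_pos h]
        by_cases h2 : ∀ p ∈ rest, ∀ c ∈ p, pvOkA c = true
        · rw [if_pos h2, if_pos ⟨h, h2⟩]
        · rw [if_neg h2, if_neg (fun hc => h2 hc.2)]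
      · rw [if_neg h, if_neg (not_and_of_not_left _ h)]

theorem pvGo_forall (fuel : Nat) (l cur : List Char) (acc : List (List Char)) :
    (∀ p ∈ PySem.Chars.splitOn.go ['.'] fuel l cur acc, ∀ c ∈ p, pvOkA c = true) ↔
      ((∀ c ∈ l, pvOkA c = true) ∧ (∀ c ∈ cur, pvOkA c = true) ∧ (∀ p ∈ acc, ∀ c ∈ p, pvOkA c = true)) := by
  induction fuel generalizing l cur acc with
  | zero =>
      simp [PySem.Chars.splitOn.go]
      aesop
  | succ fuel ih =>
      cases l with
      | nil =>
          simp [PySem.Chars.splitOn.go]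
          aesop
      | cons c rest =>
          rw [PySem.Chars.splitOn.go]
          by_cases hc : c = '.'
          · subst hc
            have hpre : List.isPrefixOf ['.'] ('.' :: rest) = true := by
              simp [List.isPrefixOf]
            simp only [hpre, if_true, List.length_cons, List.length_nil, List.drop_succ_cons,
              List.drop_zero]
            rw [ih]
            have hdot : pvOkA '.' = true := by decide
            simp [hdot]
          · have hpre : List.isPrefixOf ['.'] (c :: rest) = false := by
              simp [List.isPrefixOf]
              exact fun h => hc h.symm
            simp only [hpre, Bool.false_eq_true, if_false]
            rw [ih]
            simp
            tauto

theorem pvSplit_forall (s : List Char) :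
    (∀ p ∈ PySem.Chars.splitOn s ['.'], ∀ c ∈ p, pvOkA c = true) ↔ (∀ c ∈ s, pvOkA c = true) := by
  unfold PySem.Chars.splitOn
  rw [pvGo_forall]
  simp

theorem pv_toNat_injective : Function.Injective Char.toNat := by
  intro a b h
  exact Char.ext (UInt32.toNat_inj.mp h)

theorem pvAllowed_mem (c : Char) : c ∈ pvALLOWED ↔ pvOkA c = true := by
  rw [pvALLOWED, PySem.Set.mem_ofList, pvOkA, decide_eq_true_iff]
  rw [← List.mem_map_of_injective pv_toNat_injective]
  have hmap : "-.0123456789abcdefghijklmnopqrstuvwxyz".toList.map Char.toNat =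
      [45, 46, 48, 49, 50, 51, 52, 53, 54, 55, 56, 57,
       97, 98, 99, 100, 101, 102, 103, 104, 105, 106, 107, 108, 109,
       110, 111, 112, 113, 114, 115, 116, 117, 118, 119, 120, 121, 122] := by decide
  rw [hmap]
  simp only [List.mem_cons, List.not_mem_nil, or_false]
  omega

theorem pvDiff_empty (s : List Char) :
    (PySem.Set.diff (PySem.Set.ofList s) pvALLOWED = []) ↔ (∀ c ∈ s, pvOkA c = true) := by
  unfold PySem.Set.diff
  rw [List.filter_eq_nil_iff]
  constructor
  · intro h c hc
    have := h c ((PySem.Set.mem_ofList s c).mpr hc)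
    rw [← pvAllowed_mem c]
    simpa [PySem.Set.contains] using this
  · intro h c hc
    have hm := h c ((PySem.Set.mem_ofList s c).mp hc)
    rw [← pvAllowed_mem c] at hm
    simpa [PySem.Set.contains] using hm

-- ===== VERDICT (by name: the statement is the Claim_ definition above) =====
theorem domain_is_valid_spec : Claim_equal_domain_is_valid := by
  intro domain _
  unfold Spec_domain_is_valid domain_is_valid domain_is_valid_alt
  have hlit : (".".toList : List Char) = ['.'] := rfl
  cases hb : PySem.Chars.isIn ['.'] domain.toList with
  | false =>
      simp [PySem.Str.isIn_eq, hlit, hb]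
  | true =>
      simp only [PySem.Str.isIn_eq, hlit, hb, if_true]
      rw [pvLoopParts_eq]
      by_cases hall : ∀ c ∈ domain.toList, pvOkA c = true
      · rw [if_pos ((pvSplit_forall domain.toList).mpr hall)]
        simp [(pvDiff_empty domain.toList).mpr hall]
      · rw [if_neg (fun hc => hall ((pvSplit_forall domain.toList).mp hc)),
          if_neg (fun hc => hall ((pvDiff_empty domain.toList).mp hc))]
        simp
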